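-- pv_equiv track=rewrite | github.com/itsAliAsad/gullak-mvp | gullak_scraping/compute_fund_features.py | build_directory_index
-- ===== SOURCE A (Python) =====
-- from collections import Counter, defaultdict
--
-- def build_directory_index(
--     rows: list[dict[str, str]],
-- ) -> tuple[dict[str, dict[str, str]], dict[str, dict[str, str]], set[str]]:
--     counts = Counter(row["fund_name"] for row in rows)
--     ambiguous_names = {name for name, count in counts.items() if count > 1}
--     unique_rows_by_name = {
--         row["fund_name"]: row for row in rows if row["fund_name"] not in ambiguous_names
--     }
--     rows_by_id = {row["fund_id"]: row for row in rows}
--     return rows_by_id, unique_rows_by_name, ambiguous_names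
-- ===== SOURCE B (Python) =====
-- from collections import defaultdict
--
-- def build_directory_index(rows):
--     # Group index: one pass builds rows_by_id and a name -> list-of-rows multimap;
--     # both name-keyed outputs are then read off the group index, never rescanning rows.
--     rows_by_id = {}
--     groups = defaultdict(list)
--     for row in rows:
--         rows_by_id[row["fund_id"]] = row
--         groups[row["fund_name"]].append(row)
--     ambiguous_names = set()
--     unique_rows_by_name = {}
--     for name, group in groups.items():
--         if len(group) > 1:
--             ambiguous_names.add(name)
--         else:
--             unique_rows_by_name[name] = group[0]
--     return rows_by_id, unique_rows_by_name, ambiguous_names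
-- ===== Notes on version B (the rewrite author's own statement) =====
-- stated objective: alternative
-- what changed: B replaces A's Counter-plus-two-rescans with a different data structure: one pass builds a name -> list-of-rows group index (and rows_by_id), and a second loop over the small group index reads off both ambiguous_names (len(group)>1) and unique_rows_by_name (group[0]) without ever rescanning rows or counting.
import Mathlib
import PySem

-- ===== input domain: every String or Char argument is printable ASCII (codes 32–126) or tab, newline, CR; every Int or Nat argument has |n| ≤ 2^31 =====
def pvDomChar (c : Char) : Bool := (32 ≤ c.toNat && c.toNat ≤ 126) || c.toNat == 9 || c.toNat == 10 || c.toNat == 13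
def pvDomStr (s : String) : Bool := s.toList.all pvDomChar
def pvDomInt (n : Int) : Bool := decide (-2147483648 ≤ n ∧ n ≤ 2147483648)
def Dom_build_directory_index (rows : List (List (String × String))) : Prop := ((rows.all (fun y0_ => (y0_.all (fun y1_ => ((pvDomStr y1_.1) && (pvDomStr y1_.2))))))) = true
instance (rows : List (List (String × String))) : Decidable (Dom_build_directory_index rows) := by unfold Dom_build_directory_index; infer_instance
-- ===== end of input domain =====

-- B replaces A's Counter-plus-two-rescans with a name -> list-of-rows group index built in one pass
-- together with rows_by_id; both name-keyed outputs are then read off the group index.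

-- ===== PORT A =====
-- row["fund_name"] / row["fund_id"]; Pre_ guarantees the key is present, so the default is never used
def pvName (row : List (String × String)) : String := ((PySem.Dict.mk row).get? "fund_name").getD ""
def pvId (row : List (String × String)) : String := ((PySem.Dict.mk row).get? "fund_id").getD ""

def build_directory_index (rows : List (List (String × String))) : (List (String × List (String × String))) × (List (String × List (String × String))) × List String :=
  -- counts = Counter(row["fund_name"] for row in rows)
  let counts : PySem.Dict String Int := PySem.Dict.counter (rows.map pvName)
  -- ambiguous_names = {name for name, count in counts.items() if count > 1}
  let ambiguous_names : PySem.Set String :=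
    PySem.Set.ofList ((counts.items.filter (fun p => 1 < p.2)).map (·.1))
  -- unique_rows_by_name = {row["fund_name"]: row for row in rows if row["fund_name"] not in ambiguous_names}
  let unique_rows_by_name : PySem.Dict String (List (String × String)) :=
    rows.foldl (fun d row => if ambiguous_names.contains (pvName row) then d else d.insert (pvName row) row) PySem.Dict.empty
  -- rows_by_id = {row["fund_id"]: row for row in rows}
  let rows_by_id : PySem.Dict String (List (String × String)) :=
    rows.foldl (fun d row => d.insert (pvId row) row) PySem.Dict.empty
  (rows_by_id.items, unique_rows_by_name.items, ambiguous_names)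

-- ===== PORT B =====
def build_directory_index_alt (rows : List (List (String × String))) : (List (String × List (String × String))) × (List (String × List (String × String))) × List String :=
  -- one pass: rows_by_id[row["fund_id"]] = row; groups[row["fund_name"]].append(row)  (defaultdict(list))
  let st :=
    rows.foldl
      (fun (s : PySem.Dict String (List (String × String)) × PySem.Dict String (List (List (String × String)))) row =>
        (s.1.insert (pvId row) row,
         s.2.modify (pvName row) [] (fun g => g ++ [row])))
      (PySem.Dict.empty, PySem.Dict.empty)
  -- for name, group in groups.items(): len(group) > 1 → ambiguous; else unique[name] = group[0]
  -- (group is nonempty by construction, so pyGetD's default is never used)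
  let fin :=
    st.2.items.foldl
      (fun (s : PySem.Set String × PySem.Dict String (List (String × String))) p =>
        if 1 < p.2.length then (PySem.Set.add s.1 p.1, s.2)
        else (s.1, s.2.insert p.1 (PySem.List.pyGetD p.2 0 [])))
      (PySem.Set.empty, PySem.Dict.empty)
  (st.1.items, fin.2.items, fin.1)

-- ===== PRECONDITION & SPEC =====
-- Pre_: every row must have the "fund_name" and "fund_id" keys; on a row missing one A raises KeyError.
def Pre_build_directory_index (rows : List (List (String × String))) : Prop :=
  ∀ row ∈ rows, ((PySem.Dict.mk row).get? "fund_name").isSome ∧ ((PySem.Dict.mk row).get? "fund_id").isSome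
instance (rows : List (List (String × String))) : Decidable (Pre_build_directory_index rows) := by unfold Pre_build_directory_index; infer_instance

def pvWitness_build_directory_index : (List (List (String × String))) :=
  [[("fund_name", "Alpha"), ("fund_id", "1")], [("fund_name", "Alpha"), ("fund_id", "2")], [("fund_name", "Beta"), ("fund_id", "1")]]

def Spec_build_directory_index (rows : List (List (String × String))) (out : (List (String × List (String × String))) × (List (String × List (String × String))) × List String) : Prop := out = build_directory_index_alt rows
instance (rows : List (List (String × String))) (out : (List (String × List (String × String))) × (List (String × List (String × String))) × List String) : Decidable (Spec_build_directory_index rows out) := by unfold Spec_build_directory_index; infer_instance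

-- ===== CLAIM (what is proved, stated in full; the proofs are below) =====
def Claim_equal_build_directory_index : Prop := ∀ (rows : List (List (String × String))), Dom_build_directory_index rows → Pre_build_directory_index rows → Spec_build_directory_index rows (build_directory_index rows)

-- ===== LEMMAS AND PROOFS =====

-- A's membership test in ambiguous_names, for a row of the input: the row's name does NOT occur exactly once
theorem amb_contains (rows : List (List (String × String))) (row : List (String × String)) (hm : row ∈ rows) :
    (PySem.Set.ofList (((PySem.Dict.counter (rows.map pvName)).items.filter (fun p => 1 < p.2)).map (·.1))).contains (pvName row)
    = !((rows.map pvName).count (pvName row) == 1) := by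
  have hmem : pvName row ∈ rows.map pvName := List.mem_map_of_mem hm
  have hpos : 0 < (rows.map pvName).count (pvName row) := List.count_pos_iff.mpr hmem
  rw [Bool.eq_iff_iff]
  simp only [PySem.Set.contains, List.contains_iff_mem, PySem.Set.mem_ofList,
    PySem.Dict.items_counter, List.filter_map, List.map_map]
  constructor
  · intro hin
    obtain ⟨k, hk, hkeq⟩ := List.mem_map.mp hin
    have h2 := (List.mem_filter.mp hk).2
    simp only [Function.comp, decide_eq_true_eq] at h2
    simp only [Function.comp] at hkeq
    subst hkeq
    simp only [Bool.not_eq_true', beq_eq_false_iff_ne]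
    omega
  · intro h
    simp only [Bool.not_eq_true', beq_eq_false_iff_ne] at h
    refine List.mem_map.mpr ⟨pvName row, List.mem_filter.mpr ⟨?_, ?_⟩, rfl⟩
    · exact (PySem.Set.mem_ofList _ _).mpr hmem
    · simp only [Function.comp, decide_eq_true_eq]
      omega

-- the names of the rows whose name occurs exactly once are pairwise distinct
theorem uniq_names_nodup (rows : List (List (String × String))) :
    ((rows.filter (fun row => (rows.map pvName).count (pvName row) == 1)).map pvName).Nodup := by
  apply List.nodup_iff_count_le_one.mpr
  intro x
  by_cases hx : x ∈ (rows.filter (fun row => (rows.map pvName).count (pvName row) == 1)).map pvName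
  swap
  · simp [List.count_eq_zero_of_not_mem hx]
  have hsub : ((rows.filter (fun row => (rows.map pvName).count (pvName row) == 1)).map pvName).Sublist (rows.map pvName) :=
    List.Sublist.map pvName List.filter_sublist
  obtain ⟨row, hrow, hname⟩ := List.mem_map.mp hx
  have hP := (List.mem_filter.mp hrow).2
  have h1 : (rows.map pvName).count (pvName row) = 1 := by simpa using hP
  have := hsub.count_le x
  subst hname
  omega

-- A's unique_rows_by_name dict has, as items, the unique-named rows in row order
theorem uniqueA_items (rows : List (List (String × String))) :
    (rows.foldl (fun d row =>
        if (PySem.Set.ofList (((PySem.Dict.counter (rows.map pvName)).items.filter (fun p => 1 < p.2)).map (·.1))).contains (pvName row)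
        then d else d.insert (pvName row) row) PySem.Dict.empty).items
    = (rows.filter (fun row => (rows.map pvName).count (pvName row) == 1)).map (fun row => (pvName row, row)) := by
  rw [PySem.List.foldl_congr_mem rows _
      (fun d row => if (rows.map pvName).count (pvName row) == 1 then d.insert (pvName row) row else d) _
      (by
        intro acc row hm
        rw [amb_contains rows row hm]
        cases h : ((rows.map pvName).count (pvName row) == 1) <;> simp [h])]
  rw [PySem.List.foldl_if_eq_foldl_filter]
  rw [PySem.Dict.items_foldl_insert_fresh _ pvName (fun a => a) _
      (fun a _ => PySem.Dict.contains_empty _) (uniq_names_nodup rows)]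
  simp [PySem.Dict.empty]

-- a fold of Set.add collects, after a filter P that only holds on once-occurring fresh elements, acc's and l's P-elements in order
theorem foldl_add_filter (P : String → Bool) :
    ∀ (l acc : List String), (∀ x ∈ l, P x = true → x ∉ acc ∧ l.count x = 1) →
      (l.foldl PySem.Set.add acc).filter P = acc.filter P ++ l.filter P := by
  intro l
  induction l with
  | nil => intro acc _; simp
  | cons a t IH =>
    intro acc h
    by_cases hPa : P a = true
    · obtain ⟨hna, hcnt⟩ := h a List.mem_cons_self hPa
      have hat : a ∉ t := by
        simp only [List.count_cons_self] at hcnt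
        exact List.count_eq_zero.mp (by omega)
      have hadd : PySem.Set.add acc a = acc ++ [a] := by
        simp [PySem.Set.add, PySem.Set.contains, hna]
      rw [List.foldl_cons, hadd, IH (acc ++ [a]) ?h']
      case h' =>
        intro x hx hPx
        have hxa : x ≠ a := fun he => hat (he ▸ hx)
        obtain ⟨hx1, hx2⟩ := h x (List.mem_cons_of_mem _ hx) hPx
        exact ⟨by simp [hxa, hx1], by simpa [List.count_cons, Ne.symm hxa] using hx2⟩
      simp [List.filter_append, hPa]
    · have hPa' : P a = false := by simpa using hPa
      have hadd : PySem.Set.add acc a = acc ∨ PySem.Set.add acc a = acc ++ [a] := by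
        by_cases hc : a ∈ acc
        · exact Or.inl (by simp [PySem.Set.add, PySem.Set.contains, hc])
        · exact Or.inr (by simp [PySem.Set.add, PySem.Set.contains, hc])
      have h' : ∀ b, (b = acc ∨ b = acc ++ [a]) → ∀ x ∈ t, P x = true → x ∉ b ∧ t.count x = 1 := by
        intro b hb x hx hPx
        have hxa : x ≠ a := fun he => hPa (he ▸ hPx)
        obtain ⟨hx1, hx2⟩ := h x (List.mem_cons_of_mem _ hx) hPx
        refine ⟨?_, by simpa [List.count_cons, Ne.symm hxa] using hx2⟩
        rcases hb with rfl | rfl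
        · exact hx1
        · simp [hxa, hx1]
      rcases hadd with he | he
      · rw [List.foldl_cons, he, IH acc (h' acc (Or.inl rfl))]
        simp [hPa']
      · rw [List.foldl_cons, he, IH (acc ++ [a]) (h' _ (Or.inr rfl))]
        simp [List.filter_append, hPa']

-- the group index: its items are the distinct names in first-occurrence order, each with its rows in row order
theorem groups_items (rows : List (List (String × String))) :
    (rows.foldl (fun d row => d.modify (pvName row) [] (fun g => g ++ [row])) PySem.Dict.empty).items
    = (PySem.Set.ofList (rows.map pvName)).map (fun k => (k, rows.filter (fun r => pvName r == k))) := by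
  have hfold : rows.foldl (fun d row => d.modify (pvName row) [] (fun g => g ++ [row])) PySem.Dict.empty
      = (rows.map (fun r => (pvName r, r))).foldl (fun d p => d.modify p.1 [] (fun g => g ++ [p.2])) PySem.Dict.empty := by
    rw [List.foldl_map]
  have hnd : (rows.foldl (fun d row => d.modify (pvName row) [] (fun g => g ++ [row])) PySem.Dict.empty).keys.Nodup :=
    PySem.Dict.nodup_keys_foldl_modify_key rows pvName [] (fun d row g => g ++ [row]) _ (by simp)
  have hkeys : (rows.foldl (fun d row => d.modify (pvName row) [] (fun g => g ++ [row])) PySem.Dict.empty).keys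
      = PySem.Set.ofList (rows.map pvName) := by
    rw [PySem.Dict.keys_foldl_modify_key]
    simp [PySem.Dict.keys_empty, PySem.Set.update, PySem.Set.ofList_eq_foldl]
  have hget : ∀ k, (rows.foldl (fun d row => d.modify (pvName row) [] (fun g => g ++ [row])) PySem.Dict.empty).getD k []
      = rows.filter (fun r => pvName r == k) := by
    intro k
    rw [hfold, PySem.Dict.getD_foldl_modify_append]
    rw [List.filter_map, List.map_map]
    simp [Function.comp_def, PySem.Dict.getD_empty]
  rw [PySem.Dict.items_eq_map_keys _ hnd ([] : List (List (String × String))), hkeys]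
  exact List.map_congr_left (fun k _ => by rw [hget k])

-- a group's length is its name's multiplicity
theorem grp_length (rows : List (List (String × String))) (k : String) :
    (rows.filter (fun r => pvName r == k)).length = (rows.map pvName).count k := by
  rw [List.count, List.countP_map, ← List.countP_eq_length_filter]
  rfl

-- a once-occurring name's group is exactly its row
theorem grp_singleton (rows : List (List (String × String))) (r : List (String × String))
    (hm : r ∈ rows) (h1 : (rows.map pvName).count (pvName r) = 1) :
    rows.filter (fun r' => pvName r' == pvName r) = [r] := by
  have hmem : r ∈ rows.filter (fun r' => pvName r' == pvName r) := List.mem_filter.mpr ⟨hm, by simp⟩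
  have hlen : (rows.filter (fun r' => pvName r' == pvName r)).length = 1 := by
    rw [grp_length]; exact h1
  obtain ⟨x, hx⟩ := List.length_eq_one_iff.mp hlen
  rw [hx] at hmem ⊢
  simp only [List.mem_singleton] at hmem
  rw [hmem]

-- ===== VERDICT (by name: the statement is the Claim_ definition above) =====
theorem build_directory_index_spec : Claim_equal_build_directory_index := by
  intro rows _ _
  unfold Spec_build_directory_index build_directory_index build_directory_index_alt
  dsimp only
  rw [PySem.List.foldl_prod_mk
      (f := fun d row => PySem.Dict.insert d (pvId row) row)
      (g := fun (d : PySem.Dict String (List (List (String × String)))) row => d.modify (pvName row) [] (fun g => g ++ [row]))]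
  dsimp only
  rw [PySem.List.foldl_congr_mem _ _
      (fun (s : PySem.Set String × PySem.Dict String (List (String × String))) p =>
        ((if 1 < p.2.length then PySem.Set.add s.1 p.1 else s.1),
         (if 1 < p.2.length then s.2 else s.2.insert p.1 (PySem.List.pyGetD p.2 0 [])))) _
      (by intro acc p _; by_cases h : 1 < p.2.length <;> simp [h])]
  rw [PySem.List.foldl_prod_mk
      (f := fun (a : PySem.Set String) (p : String × List (List (String × String))) => if 1 < p.2.length then PySem.Set.add a p.1 else a)
      (g := fun (d : PySem.Dict String (List (String × String))) (p : String × List (List (String × String))) => if 1 < p.2.length then d else d.insert p.1 (PySem.List.pyGetD p.2 0 []))]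
  dsimp only
  refine Prod.ext rfl (Prod.ext ?_ ?_)
  -- notation
  all_goals rw [groups_items rows]
  -- ===== unique_rows_by_name component =====
  · dsimp only
    rw [uniqueA_items rows]
    rw [PySem.List.foldl_congr_mem _ _
        (fun (d : PySem.Dict String (List (String × String))) p =>
          if ¬ 1 < p.2.length then d.insert p.1 (PySem.List.pyGetD p.2 0 []) else d) _
        (by intro acc p _; by_cases h : 1 < p.2.length <;> simp [h])]
    rw [PySem.List.foldl_ite_eq_foldl_filter]
    rw [List.filter_map]
    rw [List.filter_congr (q := fun k => (rows.map pvName).count k == 1)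
        (by
          intro k hk
          have hmem : k ∈ rows.map pvName := (PySem.Set.mem_ofList _ _).mp hk
          have hpos : 0 < (rows.map pvName).count k := List.count_pos_iff.mpr hmem
          simp only [Function.comp, grp_length]
          rw [Bool.eq_iff_iff]
          simp only [decide_eq_true_eq, beq_iff_eq]
          omega)]
    have hS : (PySem.Set.ofList (rows.map pvName)).filter (fun k => (rows.map pvName).count k == 1)
        = (rows.map pvName).filter (fun k => (rows.map pvName).count k == 1) := by
      have := foldl_add_filter (fun k => (rows.map pvName).count k == 1) (rows.map pvName) []
        (by intro x _ hx; exact ⟨List.not_mem_nil, by simpa using hx⟩)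
      simpa [PySem.Set.ofList_eq_foldl] using this
    rw [hS, List.filter_map, List.map_map, List.foldl_map]
    rw [PySem.List.foldl_congr_mem _ _
        (fun (d : PySem.Dict String (List (String × String))) r => d.insert (pvName r) r) _
        (by
          intro acc r hr
          have hr' := List.mem_filter.mp hr
          have h1 : (rows.map pvName).count (pvName r) = 1 := by
            have := hr'.2; simp only [Function.comp] at this; simpa using this
          have := grp_singleton rows r hr'.1 h1
          simp only [Function.comp]
          rw [this]
          simp [PySem.List.pyGetD, PySem.List.pyGet?, PySem.List.pyIdx?])]
    rw [PySem.Dict.items_foldl_insert_fresh _ pvName (fun a => a) _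
        (fun a _ => PySem.Dict.contains_empty _)
        (by
          have h := uniq_names_nodup rows
          simpa [Function.comp] using h)]
    · simp only [PySem.Dict.empty, List.nil_append]
      apply List.map_congr_left
      intro r hr
      rfl
  -- ===== ambiguous_names component =====
  · dsimp only
    rw [PySem.List.foldl_ite_eq_foldl_filter]
    rw [← List.foldl_map (f := fun p : String × List (List (String × String)) => p.1) (g := PySem.Set.add)]
    have hofl : ∀ xs : List String, xs.foldl PySem.Set.add PySem.Set.empty = PySem.Set.ofList xs := by
      intro xs; rw [PySem.Set.ofList_eq_foldl]; rfl
    rw [hofl]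
    rw [List.filter_map, List.map_map]
    rw [PySem.Dict.items_counter, List.filter_map, List.map_map]
    congr 1
    have : ((fun p : String × List (List (String × String)) => p.1) ∘ fun k => (k, rows.filter (fun r => pvName r == k)))
        = fun k => k := rfl
    rw [this]
    have : ((fun p : String × Int => p.1) ∘ fun k => (k, ((rows.map pvName).count k : Int))) = fun k => k := rfl
    rw [this]
    simp only [List.map_id']
    apply List.filter_congr
    intro k _
    simp only [Function.comp, grp_length]
    rw [Bool.eq_iff_iff]
    simp only [decide_eq_true_eq]
    omega
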